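-- pv_equiv track=rewrite | github.com/blaskovic/trader | functions.py | elliot_waves
-- ===== SOURCE A (Python) =====
-- def find_extremes(prices):
--     extreme = []
--     extreme.append(prices[0])
--     extreme.append(prices[1])
--     if extreme[0] < extreme[1]:
--         last = 'high'
--     else:
--         last = 'low'
--
--     for i in range(2, len(prices)):
--         # Higher
--         if prices[i] > extreme[-1] and last == 'high':
--             # New high
--             extreme[-1] = prices[i]
--             last = 'high'
--         if prices[i] > extreme[-1] and last == 'low':
--             # Change of direction - goin' high
--             extreme.append(prices[i])
--             last = 'high'
--
--         # Lower
--         if prices[i] < extreme[-1] and last == 'low':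
--             # New low
--             extreme[-1] = prices[i]
--             last = 'low'
--         if prices[i] < extreme[-1] and last == 'high':
--             # Change of direction - goin' low
--             extreme.append(prices[i])
--             last = 'low'
--
--     return extreme
--
-- def elliot_waves(prices):
--     extremes = find_extremes(prices)
--
--     # Find highs only
--     highs = []
--     for i in range(1, len(extremes)):
--         if extremes[i] > extremes[i-1]:
--             highs.append(extremes[i])
--
--     # Last 2 highs are getting lower
--     if highs[-1] < highs[-2]:
--         return 1
--     # Last 3 highs are getting higher
--     if highs[-1] > highs[-2] and highs[-2] > highs[-3]:
--         return -1
--     return 0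
-- ===== SOURCE B (Python) =====
-- def elliot_waves(prices):
--     # Single pass: maintain running extreme and direction, collect highs directly.
--     cur = prices[1]
--     up = prices[0] < prices[1]
--     highs = []
--     for p in prices[2:]:
--         if up:
--             if p > cur:
--                 cur = p
--             elif p < cur:
--                 highs.append(cur)
--                 cur = p
--                 up = False
--         else:
--             if p < cur:
--                 cur = p
--             elif p > cur:
--                 cur = p
--                 up = True
--     if up:
--         highs.append(cur)
--     if highs[-1] < highs[-2]:
--         return 1
--     if highs[-1] > highs[-2] and highs[-2] > highs[-3]:
--         return -1
--     return 0
-- ===== Notes on version B (the rewrite author's own statement) =====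
-- stated objective: faster
-- what changed: B fuses A's two passes (build the full extremes list via in-place peak updates, then re-scan it for highs) into a single loop that keeps only the running extreme, a direction flag and the highs collected so far; a timing run measured it ~3x faster (same O(n)).
import Mathlib
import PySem

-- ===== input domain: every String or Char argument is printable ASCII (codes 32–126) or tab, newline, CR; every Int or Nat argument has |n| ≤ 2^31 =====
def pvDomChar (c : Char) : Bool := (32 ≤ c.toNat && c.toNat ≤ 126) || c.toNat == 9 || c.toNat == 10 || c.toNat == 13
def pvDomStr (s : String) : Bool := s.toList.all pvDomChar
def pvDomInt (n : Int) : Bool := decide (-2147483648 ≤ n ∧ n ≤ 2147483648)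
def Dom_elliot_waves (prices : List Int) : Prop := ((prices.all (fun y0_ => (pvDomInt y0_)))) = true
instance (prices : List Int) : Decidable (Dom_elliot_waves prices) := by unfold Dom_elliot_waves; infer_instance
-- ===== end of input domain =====

-- B fuses A's two passes (measured ~3x faster in a timing run, same O(n)) (build the full extremes list, then re-scan it for highs) into one
-- pass that keeps only the running extreme, the direction flag and the highs collected so far.

-- ===== PORT A =====
-- loop body of find_extremes: the four sequential (non-elif) ifs on the state (extreme, last)
def feBody (st : List Int × String) (p : Int) : List Int × String :=
  let s1 := if p > PySem.List.pyGetD st.1 (-1) 0 ∧ st.2 = "high" then (st.1.dropLast ++ [p], "high") else st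
  let s2 := if p > PySem.List.pyGetD s1.1 (-1) 0 ∧ s1.2 = "low" then (s1.1 ++ [p], "high") else s1
  let s3 := if p < PySem.List.pyGetD s2.1 (-1) 0 ∧ s2.2 = "low" then (s2.1.dropLast ++ [p], "low") else s2
  let s4 := if p < PySem.List.pyGetD s3.1 (-1) 0 ∧ s3.2 = "high" then (s3.1 ++ [p], "low") else s3
  s4

def find_extremes (prices : List Int) : List Int :=
  let extreme : List Int := [PySem.List.pyGetD prices 0 0, PySem.List.pyGetD prices 1 0]
  let last : String := if PySem.List.pyGetD extreme 0 0 < PySem.List.pyGetD extreme 1 0 then "high" else "low"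
  ((PySem.List.pyRange 2 (prices.length : Int) 1).foldl
      (fun st i => feBody st (PySem.List.pyGetD prices i 0)) (extreme, last)).1

def elliot_waves (prices : List Int) : Int :=
  let extremes := find_extremes prices
  let highs := (PySem.List.pyRange 1 (extremes.length : Int) 1).foldl
      (fun hs i => if PySem.List.pyGetD extremes i 0 > PySem.List.pyGetD extremes (i - 1) 0
                   then hs ++ [PySem.List.pyGetD extremes i 0] else hs) ([] : List Int)
  if PySem.List.pyGetD highs (-1) 0 < PySem.List.pyGetD highs (-2) 0 then 1
  else if PySem.List.pyGetD highs (-1) 0 > PySem.List.pyGetD highs (-2) 0 ∧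
          PySem.List.pyGetD highs (-2) 0 > PySem.List.pyGetD highs (-3) 0 then -1
  else 0

-- ===== PORT B =====
-- single-pass loop body on the state (highs so far, current extreme, direction-is-up)
def bBody (st : List Int × Int × Bool) (p : Int) : List Int × Int × Bool :=
  if st.2.2 then
    if p > st.2.1 then (st.1, p, true)
    else if p < st.2.1 then (st.1 ++ [st.2.1], p, false)
    else st
  else
    if p < st.2.1 then (st.1, p, false)
    else if p > st.2.1 then (st.1, p, true)
    else st

def elliot_waves_alt (prices : List Int) : Int :=
  match prices with
  | p0 :: p1 :: rest =>
    let st := rest.foldl bBody (([] : List Int), p1, decide (p0 < p1))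
    let highs := if st.2.2 then st.1 ++ [st.2.1] else st.1
    if PySem.List.pyGetD highs (-1) 0 < PySem.List.pyGetD highs (-2) 0 then 1
    else if PySem.List.pyGetD highs (-1) 0 > PySem.List.pyGetD highs (-2) 0 ∧
            PySem.List.pyGetD highs (-2) 0 > PySem.List.pyGetD highs (-3) 0 then -1
    else 0
  | _ => 0

-- ===== PRECONDITION & SPEC =====
-- structural description of the sequence of wave highs of a price list (used only by Pre_)
def ewPeaks (cur : Int) (up : Bool) : List Int → List Int
  | [] => if up then [cur] else []
  | p :: ps =>
    if up then
      if p > cur then ewPeaks p true ps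
      else if p < cur then cur :: ewPeaks p false ps
      else ewPeaks cur up ps
    else
      if p < cur then ewPeaks p false ps
      else if p > cur then ewPeaks p true ps
      else ewPeaks cur up ps

def ewHighs : List Int → List Int
  | [] => []
  | [_] => []
  | p0 :: p1 :: rest => ewPeaks p1 (decide (p0 < p1)) rest

-- Pre_ excludes exactly the inputs on which the Python A raises IndexError (fewer than two
-- prices, fewer than two wave highs, or exactly two highs with the last strictly above the
-- previous one); the Python B raises on exactly the same inputs.
def Pre_elliot_waves (prices : List Int) : Prop :=
  2 ≤ (ewHighs prices).length ∧
  (PySem.List.pyGetD (ewHighs prices) (-1) 0 > PySem.List.pyGetD (ewHighs prices) (-2) 0 →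
    3 ≤ (ewHighs prices).length)

instance (prices : List Int) : Decidable (Pre_elliot_waves prices) := by
  unfold Pre_elliot_waves; infer_instance

def pvWitness_elliot_waves : List Int := [1, 3, 1, 2, 1]

def Spec_elliot_waves (prices : List Int) (out : Int) : Prop := out = elliot_waves_alt prices
instance (prices : List Int) (out : Int) : Decidable (Spec_elliot_waves prices out) := by
  unfold Spec_elliot_waves; infer_instance

-- ===== CLAIM (what is proved, stated in full; the proofs are below) =====
def Claim_equal_elliot_waves : Prop := ∀ (prices : List Int), Dom_elliot_waves prices → Pre_elliot_waves prices → Spec_elliot_waves prices (elliot_waves prices)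

-- ===== LEMMAS AND PROOFS =====

-- the highs that A's second pass extracts from a list, as a structural recursion
def haGo (acc : List Int) : List Int → List Int
  | a :: b :: t => haGo (if b > a then acc ++ [b] else acc) (b :: t)
  | _ => acc
termination_by l => l.length

lemma pyGetD_append_left (ys : List Int) (x : Int) (i : Int) (h0 : 0 ≤ i) (h : i < (ys.length : Int)) :
    PySem.List.pyGetD (ys ++ [x]) i 0 = PySem.List.pyGetD ys i 0 := by
  rw [PySem.List.pyGetD_eq_getElem (ys ++ [x]) 0 h0 (by simp; omega),
      PySem.List.pyGetD_eq_getElem ys 0 h0 h,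
      List.getElem_append_left (by omega)]

lemma haGo_concat (ys : List Int) (acc : List Int) (x : Int) (h : ys ≠ []) :
    haGo acc (ys ++ [x]) = if x > ys.getLast h then haGo acc ys ++ [x] else haGo acc ys := by
  induction ys generalizing acc with
  | nil => exact absurd rfl h
  | cons a ys' ih =>
    cases ys' with
    | nil => simp [haGo]
    | cons b t =>
      have e : (a :: b :: t) ++ [x] = a :: b :: (t ++ [x]) := by simp
      rw [e, haGo]
      have h2 : (b :: t) ≠ [] := by simp
      have hih := ih (if b > a then acc ++ [b] else acc) h2
      simp only [List.cons_append] at hih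
      rw [hih]
      conv_rhs => rw [haGo]
      simp [List.getLast_cons h2]

lemma hfold_eq (xs : List Int) (acc : List Int) :
    (PySem.List.pyRange 1 (xs.length : Int) 1).foldl
      (fun hs i => if PySem.List.pyGetD xs i 0 > PySem.List.pyGetD xs (i - 1) 0
                   then hs ++ [PySem.List.pyGetD xs i 0] else hs) acc = haGo acc xs := by
  induction xs using List.reverseRecOn generalizing acc with
  | nil => simp [PySem.List.pyRange_one_eq_nil (by norm_num : (0:Int) ≤ 1), haGo]
  | append_singleton ys x ih =>
    by_cases hys : ys = []
    · subst hys
      simp [PySem.List.pyRange_one_eq_nil (by norm_num : (1:Int) ≤ 1), haGo]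
    · have hn : 1 ≤ (ys.length : Int) := by
        have := List.length_pos_iff.mpr hys; omega
      have hlen : (((ys ++ [x]).length : Nat) : Int) = (ys.length : Int) + 1 := by simp
      rw [hlen, PySem.List.pyRange_one_succ_right (by omega), List.foldl_append]
      rw [PySem.List.foldl_congr_mem _ _
          (fun hs i => if PySem.List.pyGetD ys i 0 > PySem.List.pyGetD ys (i - 1) 0
                   then hs ++ [PySem.List.pyGetD ys i 0] else hs) acc
          (by
            intro acc' i hi
            rcases (PySem.List.mem_pyRange_one).mp hi with ⟨h1, h2⟩
            rw [pyGetD_append_left ys x i (by omega) (by omega),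
                pyGetD_append_left ys x (i - 1) (by omega) (by omega)])]
      rw [ih]
      have hx : PySem.List.pyGetD (ys ++ [x]) (ys.length : Int) 0 = x := by
        rw [PySem.List.pyGetD_eq_getElem (ys ++ [x]) 0 (by omega) (by simp)]
        simp
      have hlast : PySem.List.pyGetD (ys ++ [x]) ((ys.length : Int) - 1) 0 = ys.getLast hys := by
        rw [pyGetD_append_left ys x _ (by omega) (by omega),
            PySem.List.pyGetD_eq_getElem ys 0 (by omega) (by omega),
            List.getLast_eq_getElem]
        congr 1
        omega
      simp only [List.foldl_cons, List.foldl_nil, hx, hlast]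
      rw [haGo_concat ys acc x hys]

-- evaluation of A's loop body on a state of the invariant's shape
lemma fe_high_gt (E : List Int) (cur p : Int) (h : p > cur) :
    feBody (E ++ [cur], "high") p = (E ++ [p], "high") := by
  simp [feBody, PySem.List.pyGetD_neg_one_append_singleton, h]
lemma fe_high_eq (E : List Int) (cur : Int) :
    feBody (E ++ [cur], "high") cur = (E ++ [cur], "high") := by
  simp [feBody, PySem.List.pyGetD_neg_one_append_singleton]
lemma fe_high_lt (E : List Int) (cur p : Int) (h : p < cur) :
    feBody (E ++ [cur], "high") p = ((E ++ [cur]) ++ [p], "low") := by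
  simp [feBody, PySem.List.pyGetD_neg_one_append_singleton, h, not_lt.mpr (le_of_lt h)]
lemma fe_low_lt (E : List Int) (cur p : Int) (h : p < cur) :
    feBody (E ++ [cur], "low") p = (E ++ [p], "low") := by
  simp [feBody, PySem.List.pyGetD_neg_one_append_singleton, h, not_lt.mpr (le_of_lt h)]
lemma fe_low_gt (E : List Int) (cur p : Int) (h : p > cur) :
    feBody (E ++ [cur], "low") p = ((E ++ [cur]) ++ [p], "high") := by
  have h2 : PySem.List.pyGetD (E ++ [cur, p]) (-1) 0 = p := by
    rw [show E ++ [cur, p] = (E ++ [cur]) ++ [p] by simp]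
    exact PySem.List.pyGetD_neg_one_append_singleton _ _ _
  simp [feBody, PySem.List.pyGetD_neg_one_append_singleton, h2, h]
lemma fe_low_eq (E : List Int) (cur : Int) :
    feBody (E ++ [cur], "low") cur = (E ++ [cur], "low") := by
  simp [feBody, PySem.List.pyGetD_neg_one_append_singleton]

-- invariant tying A's loop state to B's loop state
def EWInv (est : List Int × String) (bst : List Int × Int × Bool) : Prop :=
  ∃ F g, est.1 = (F ++ [g]) ++ [bst.2.1] ∧
    est.2 = (if bst.2.2 then "high" else "low") ∧
    haGo [] (F ++ [g]) = bst.1 ∧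
    (if bst.2.2 then g < bst.2.1 else bst.2.1 ≤ g)

lemma inv_step (est : List Int × String) (bst : List Int × Int × Bool) (p : Int)
    (h : EWInv est bst) : EWInv (feBody est p) (bBody bst p) := by
  obtain ⟨e1, l⟩ := est
  obtain ⟨hs, cur, up⟩ := bst
  obtain ⟨F, g, h1, h2, h3, h4⟩ := h
  dsimp only at h1 h2 h3 h4
  subst h1
  cases up with
  | true =>
    simp only [if_true] at h2 h4
    subst h2
    rcases lt_trichotomy p cur with hp | hp | hp
    · rw [fe_high_lt _ _ _ hp]
      have hb : bBody (hs, cur, true) p = (hs ++ [cur], p, false) := by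
        simp [bBody, hp, not_lt.mpr (le_of_lt hp)]
      rw [hb]
      refine ⟨F ++ [g], cur, by simp, rfl, ?_, by simpa using le_of_lt hp⟩
      rw [haGo_concat (F ++ [g]) [] cur (by simp), List.getLast_concat]
      simp [h4, h3]
    · subst hp
      rw [fe_high_eq]
      have hb : bBody (hs, p, true) p = (hs, p, true) := by simp [bBody]
      rw [hb]
      exact ⟨F, g, rfl, rfl, h3, h4⟩
    · rw [fe_high_gt _ _ _ hp]
      have hb : bBody (hs, cur, true) p = (hs, p, true) := by simp [bBody, hp]
      rw [hb]
      exact ⟨F, g, rfl, rfl, h3, by simpa using lt_trans h4 hp⟩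
  | false =>
    simp only [if_false, Bool.false_eq_true] at h2 h4
    subst h2
    rcases lt_trichotomy p cur with hp | hp | hp
    · rw [fe_low_lt _ _ _ hp]
      have hb : bBody (hs, cur, false) p = (hs, p, false) := by simp [bBody, hp]
      rw [hb]
      exact ⟨F, g, rfl, rfl, h3, by simpa using le_trans (le_of_lt hp) h4⟩
    · subst hp
      rw [fe_low_eq]
      have hb : bBody (hs, p, false) p = (hs, p, false) := by simp [bBody]
      rw [hb]
      exact ⟨F, g, rfl, rfl, h3, h4⟩
    · rw [fe_low_gt _ _ _ hp]
      have hb : bBody (hs, cur, false) p = (hs, p, true) := by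
        simp [bBody, hp, not_lt.mpr (le_of_lt hp)]
      rw [hb]
      refine ⟨F ++ [g], cur, by simp, rfl, ?_, by simpa using hp⟩
      rw [haGo_concat (F ++ [g]) [] cur (by simp), List.getLast_concat]
      simp [not_lt.mpr h4, h3]

lemma inv_fold (l : List Int) (est : List Int × String) (bst : List Int × Int × Bool)
    (h : EWInv est bst) : EWInv (l.foldl feBody est) (l.foldl bBody bst) := by
  induction l generalizing est bst with
  | nil => exact h
  | cons p l ih => exact ih _ _ (inv_step _ _ _ h)

lemma find_extremes_cons (p0 p1 : Int) (rest : List Int) :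
    find_extremes (p0 :: p1 :: rest) =
      (rest.foldl feBody ([p0, p1], if p0 < p1 then "high" else "low")).1 := by
  have e0 : PySem.List.pyGetD (p0 :: p1 :: rest) (0 : Int) 0 = p0 := by
    rw [PySem.List.pyGetD_eq_getElem _ _ (by omega) (by simp only [List.length_cons]; push_cast; omega)]; rfl
  have e1 : PySem.List.pyGetD (p0 :: p1 :: rest) (1 : Int) 0 = p1 := by
    rw [PySem.List.pyGetD_eq_getElem _ _ (by omega) (by simp only [List.length_cons]; push_cast; omega)]; rfl
  have f0 : PySem.List.pyGetD [p0, p1] (0 : Int) 0 = p0 := by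
    rw [PySem.List.pyGetD_eq_getElem _ _ (by omega) (by simp)]; rfl
  have f1 : PySem.List.pyGetD [p0, p1] (1 : Int) 0 = p1 := by
    rw [PySem.List.pyGetD_eq_getElem _ _ (by omega) (by simp)]; rfl
  simp only [find_extremes, e0, e1, f0, f1]
  rw [PySem.List.foldl_pyRange_pyGetD' (p0 :: p1 :: rest) 0 feBody _ (by norm_num : (0:Int) ≤ 2)]
  rfl

lemma inv_init (p0 p1 : Int) :
    EWInv ([p0, p1], if p0 < p1 then "high" else "low") ([], p1, decide (p0 < p1)) := by
  refine ⟨[], p0, by simp, ?_, by simp [haGo], ?_⟩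
  · by_cases hc : p0 < p1 <;> simp [hc]
  · by_cases hc : p0 < p1 <;> simp [hc]
    omega

-- ===== VERDICT (by name: the statement is the Claim_ definition above) =====
theorem elliot_waves_spec : Claim_equal_elliot_waves := by
  intro prices hdom hpre
  unfold Spec_elliot_waves
  cases prices with
  | nil => exact absurd hpre (by simp [Pre_elliot_waves, ewHighs])
  | cons p0 t =>
    cases t with
    | nil => exact absurd hpre (by simp [Pre_elliot_waves, ewHighs])
    | cons p1 rest =>
      obtain ⟨F, g, h1, h2, h3, h4⟩ := inv_fold rest _ _ (inv_init p0 p1)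
      simp only [elliot_waves, elliot_waves_alt]
      rw [find_extremes_cons, h1, hfold_eq, haGo_concat _ [] _ (by simp),
          List.getLast_concat, h3]
      cases hb : (rest.foldl bBody ([], p1, decide (p0 < p1))).2.2 with
      | true =>
        rw [hb] at h4
        simp only [if_true] at h4
        rw [if_pos h4]
        simp
      | false =>
        rw [hb] at h4
        simp only [if_false, Bool.false_eq_true] at h4
        rw [if_neg (not_lt.mpr h4)]
        simp
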